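-- pv_equiv track=rewrite | github.com/theseven7h/PhaseGateOne | Python/studentgrade.py | get_passes_and_fails
-- ===== SOURCE A (Python) =====
-- def get_passes_and_fails(student_scores):
-- 	passes = [0] * len(student_scores[0])
-- 	fails = [0] * len(student_scores[0])
--
-- 	for i in range(len(student_scores[0])):
-- 		for j in range(len(student_scores)):
-- 			if student_scores[j][i] >= 50: passes[i] += 1
-- 			else: fails[i] += 1
-- 	return [passes, fails]
-- ===== SOURCE B (Python) =====
-- def get_passes_and_fails(student_scores):
-- 	passes = [0] * len(student_scores[0])
-- 	for row in student_scores: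
-- 		passes = [p + (s >= 50) for p, s in zip(passes, row)]
-- 	fails = [len(student_scores) - p for p in passes]
-- 	return [passes, fails]
-- ===== Notes on version B (the rewrite author's own statement) =====
-- stated objective: simpler
-- what changed: B traverses the matrix row-major in a single pass, rebuilding the per-column pass-count vector with zip at each row, and derives fails by complement (rows minus passes), instead of A's column-major nested index loops incrementing two lockstep counter arrays in place.
import Mathlib
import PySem

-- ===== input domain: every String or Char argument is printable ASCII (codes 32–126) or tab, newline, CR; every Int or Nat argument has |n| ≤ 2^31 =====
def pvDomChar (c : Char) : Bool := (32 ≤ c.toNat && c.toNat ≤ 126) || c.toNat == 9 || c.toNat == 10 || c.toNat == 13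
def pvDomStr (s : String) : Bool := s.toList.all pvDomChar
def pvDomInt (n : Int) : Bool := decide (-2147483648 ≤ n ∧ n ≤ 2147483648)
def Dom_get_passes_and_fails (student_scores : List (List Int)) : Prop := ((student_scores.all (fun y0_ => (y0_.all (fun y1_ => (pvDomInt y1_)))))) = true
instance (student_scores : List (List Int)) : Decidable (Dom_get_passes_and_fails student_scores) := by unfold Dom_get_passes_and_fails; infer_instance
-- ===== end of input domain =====

-- B replaces A's column-major nested index loops with a single row-major pass that
-- rebuilds the pass-count vector via zip at each row, deriving fails by complement
-- (objective: simpler).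

-- ===== PORT A =====
def get_passes_and_fails (student_scores : List (List Int)) : List (List Int) :=
  let passes := List.replicate (PySem.List.pyGetD student_scores 0 []).length (0 : Int)
  let fails := List.replicate (PySem.List.pyGetD student_scores 0 []).length (0 : Int)
  let pf := (PySem.List.pyRange 0 ((PySem.List.pyGetD student_scores 0 []).length : Int) 1).foldl
    (fun (pf : List Int × List Int) (i : Int) =>
      (PySem.List.pyRange 0 (student_scores.length : Int) 1).foldl
        (fun (pf : List Int × List Int) (j : Int) =>
          if PySem.List.pyGetD (PySem.List.pyGetD student_scores j []) i 0 ≥ 50 then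
            (pf.1.set i.toNat (pf.1.getD i.toNat 0 + 1), pf.2)
          else
            (pf.1, pf.2.set i.toNat (pf.2.getD i.toNat 0 + 1)))
        pf)
    (passes, fails)
  [pf.1, pf.2]

-- ===== PORT B =====
def get_passes_and_fails_alt (student_scores : List (List Int)) : List (List Int) :=
  let passes0 := List.replicate (PySem.List.pyGetD student_scores 0 []).length (0 : Int)
  let passes := student_scores.foldl
    (fun (p : List Int) row =>
      (p.zip row).map (fun ps => ps.1 + (if ps.2 ≥ 50 then 1 else 0)))
    passes0
  let fails := passes.map (fun p => (student_scores.length : Int) - p)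
  [passes, fails]

-- ===== PRECONDITION & SPEC =====
-- Pre_ excludes exactly the inputs where Python A raises IndexError: the empty matrix
-- (student_scores[0]) and jagged matrices with a row shorter than the first row.
def Pre_get_passes_and_fails (student_scores : List (List Int)) : Prop :=
  student_scores ≠ [] ∧
  ∀ row ∈ student_scores, (student_scores.headD []).length ≤ row.length
instance (student_scores : List (List Int)) : Decidable (Pre_get_passes_and_fails student_scores) := by unfold Pre_get_passes_and_fails; infer_instance
def pvWitness_get_passes_and_fails : List (List Int) := [[50, 10], [49, 99]]

def Spec_get_passes_and_fails (student_scores : List (List Int)) (out : List (List Int)) : Prop := out = get_passes_and_fails_alt student_scores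
instance (student_scores : List (List Int)) (out : List (List Int)) : Decidable (Spec_get_passes_and_fails student_scores out) := by unfold Spec_get_passes_and_fails; infer_instance

-- ===== CLAIM (what is proved, stated in full; the proofs are below) =====
def Claim_equal_get_passes_and_fails : Prop := ∀ (student_scores : List (List Int)), Dom_get_passes_and_fails student_scores → Pre_get_passes_and_fails student_scores → Spec_get_passes_and_fails student_scores (get_passes_and_fails student_scores)

-- ===== LEMMAS AND PROOFS =====

-- A's inner loop over the rows, pass branch: the whole fold just adds the pass-count at slot `it`.
theorem pv_setfold_pass (P : List Int → Prop) [DecidablePred P] (ss : List (List Int)) :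
    ∀ (p : List Int) (it : Nat), it < p.length →
    ss.foldl (fun acc row => if P row then acc.set it (acc.getD it 0 + 1) else acc) p
      = p.set it (p.getD it 0 + (ss.countP (fun row => decide (P row)) : Int)) := by
  induction ss with
  | nil =>
    intro p it h
    simp [List.getElem?_eq_getElem h, List.set_getElem_self h]
  | cons r t ih =>
    intro p it h
    simp only [List.foldl_cons, List.countP_cons]
    by_cases hr : P r
    · rw [if_pos hr, ih _ it (by simpa using h)]
      rw [List.set_set, List.getD_eq_getElem _ 0 (by simpa using h),
        List.getElem_set_self (by simpa using h), List.getD_eq_getElem p 0 h]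
      simp only [hr, decide_true, if_pos]
      congr 1
      push_cast
      ring
    · rw [if_neg hr, ih _ it h]
      simp [hr]

-- A's inner loop over the rows, fail branch: the fold adds rows-minus-passes at slot `it`.
theorem pv_setfold_fail (P : List Int → Prop) [DecidablePred P] (ss : List (List Int)) :
    ∀ (p : List Int) (it : Nat), it < p.length →
    ss.foldl (fun acc row => if P row then acc else acc.set it (acc.getD it 0 + 1)) p
      = p.set it (p.getD it 0 + ((ss.length : Int) - (ss.countP (fun row => decide (P row)) : Int))) := by
  induction ss with
  | nil =>
    intro p it h
    simp [List.getElem?_eq_getElem h, List.set_getElem_self h]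
  | cons r t ih =>
    intro p it h
    simp only [List.foldl_cons, List.countP_cons, List.length_cons]
    by_cases hr : P r
    · rw [if_pos hr, ih _ it h]
      simp only [hr, decide_true, if_pos]
      congr 1
      push_cast
      ring
    · rw [if_neg hr, ih _ it (by simpa using h)]
      rw [List.set_set, List.getD_eq_getElem _ 0 (by simpa using h),
        List.getElem_set_self (by simpa using h), List.getD_eq_getElem p 0 h]
      simp only [hr, decide_false]
      congr 1
      push_cast
      ring

-- A's outer loop: successively setting slot k to (old value + c k) over k < q, starting from zeros.
theorem pv_outer_fold (stp : List Int → Int → List Int) (c : Nat → Int)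
    (hs : ∀ (acc : List Int) (k : Nat), k < acc.length →
      stp acc (k : Int) = acc.set k (acc.getD k 0 + c k)) :
    ∀ (q N : Nat), q ≤ N →
    (PySem.List.pyRange 0 (q : Int) 1).foldl stp (List.replicate N (0 : Int))
      = (List.range q).map c ++ List.replicate (N - q) 0 := by
  intro q
  induction q with
  | zero => intro N _; simp [PySem.List.pyRange_one_eq_nil]
  | succ q ih =>
    intro N hq
    have hc : ((q + 1 : Nat) : Int) = (q : Int) + 1 := by push_cast; ring
    rw [hc, PySem.List.pyRange_one_succ_right (by positivity), List.foldl_append]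
    rw [ih N (by omega)]
    have hlen : ((List.range q).map c ++ List.replicate (N - q) (0 : Int)).length = N := by
      simp; omega
    simp only [List.foldl_cons, List.foldl_nil]
    rw [hs _ q (by omega)]
    have hql : ((List.range q).map c).length = q := by simp
    rw [List.getD_append_right _ _ _ _ (by omega), List.set_append_right _ _ (by omega)]
    have hrep : N - q = (N - (q + 1)) + 1 := by omega
    rw [hql, Nat.sub_self, hrep, List.replicate_succ]
    simp [List.range_succ]

-- B's single row-major pass: the zip-rebuilding fold computes, at each slot k,
-- the start value plus the number of rows whose k-th entry is ≥ 50.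
theorem pv_zipfold (ss : List (List Int)) :
    ∀ (p : List Int), (∀ row ∈ ss, p.length ≤ row.length) →
    ss.foldl (fun (p : List Int) row =>
        (p.zip row).map (fun ps => ps.1 + (if ps.2 ≥ 50 then 1 else 0))) p
      = (List.range p.length).map (fun k =>
          p.getD k 0 + (ss.countP (fun row => decide (PySem.List.pyGetD row (k : Int) 0 ≥ 50)) : Int)) := by
  induction ss with
  | nil =>
    intro p _
    apply List.ext_getElem (by simp)
    intro k h1 h2
    simp at h2
    simp [List.getElem?_eq_getElem h2]
  | cons r t ih =>
    intro p hlen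
    have hr : p.length ≤ r.length := hlen r (by simp)
    have hp' : ((p.zip r).map (fun ps => ps.1 + (if ps.2 ≥ 50 then 1 else 0))).length = p.length := by
      simp [List.length_zip]; omega
    rw [List.foldl_cons, ih _ (by
      intro row hrow
      rw [hp']
      exact hlen row (by simp [hrow]))]
    rw [hp']
    apply List.map_congr_left
    intro k hk
    have hkp : k < p.length := by simpa using hk
    have hkr : k < r.length := lt_of_lt_of_le hkp hr
    have hget : ((p.zip r).map (fun ps => ps.1 + (if ps.2 ≥ 50 then 1 else 0))).getD k 0
        = p.getD k 0 + (if r[k]'hkr ≥ 50 then 1 else 0) := by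
      rw [List.getD_eq_getElem _ 0 (by omega)]
      rw [List.getD_eq_getElem p 0 hkp]
      simp [List.getElem_zip]
    have hpy : PySem.List.pyGetD r (k : Int) 0 = r[k]'hkr := by
      rw [PySem.List.pyGetD_natCast]
      exact List.getD_eq_getElem r 0 hkr
    rw [hget, List.countP_cons, hpy]
    by_cases h50 : r[k]'hkr ≥ 50
    · simp only [h50, if_pos, decide_true]
      push_cast
      ring
    · simp only [h50, if_neg, not_false_iff, decide_false]
      simp

theorem get_passes_and_fails_spec : Claim_equal_get_passes_and_fails := by
  intro ss _ hpre
  obtain ⟨hne, hrows⟩ := hpre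
  unfold Spec_get_passes_and_fails get_passes_and_fails get_passes_and_fails_alt
  simp only []
  set n := (PySem.List.pyGetD ss 0 []).length with hn
  -- every row has length at least n
  have hrows' : ∀ row ∈ ss, n ≤ row.length := by
    intro row hrow
    have : PySem.List.pyGetD ss 0 [] = ss.headD [] := by
      cases ss with
      | nil => exact absurd rfl hne
      | cons h t => simp [PySem.List.pyGetD, PySem.List.pyGet?, PySem.List.pyIdx?]
    rw [hn, this]
    exact hrows row hrow
  -- rewrite A's inner loop: index loop over j = loop over the rows, then split the pair state
  have hinner : ∀ (pf : List Int × List Int) (i : Int),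
      (PySem.List.pyRange 0 (ss.length : Int) 1).foldl
        (fun (pf : List Int × List Int) (j : Int) =>
          if PySem.List.pyGetD (PySem.List.pyGetD ss j []) i 0 ≥ 50 then
            (pf.1.set i.toNat (pf.1.getD i.toNat 0 + 1), pf.2)
          else
            (pf.1, pf.2.set i.toNat (pf.2.getD i.toNat 0 + 1))) pf
      = (ss.foldl (fun acc row => if PySem.List.pyGetD row i 0 ≥ 50 then
            acc.set i.toNat (acc.getD i.toNat 0 + 1) else acc) pf.1,
         ss.foldl (fun acc row => if PySem.List.pyGetD row i 0 ≥ 50 then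
            acc else acc.set i.toNat (acc.getD i.toNat 0 + 1)) pf.2) := by
    intro pf i
    obtain ⟨p0, f0⟩ := pf
    rw [PySem.List.foldl_pyRange_zero_pyGetD' ss []
      (fun (pf : List Int × List Int) row =>
        if PySem.List.pyGetD row i 0 ≥ 50 then
          (pf.1.set i.toNat (pf.1.getD i.toNat 0 + 1), pf.2)
        else
          (pf.1, pf.2.set i.toNat (pf.2.getD i.toNat 0 + 1))) (p0, f0)]
    rw [PySem.List.foldl_congr_mem ss _
      (fun (pf : List Int × List Int) row =>
        ((fun acc r => if PySem.List.pyGetD r i 0 ≥ 50 then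
            acc.set i.toNat (acc.getD i.toNat 0 + 1) else acc) pf.1 row,
         (fun acc r => if PySem.List.pyGetD r i 0 ≥ 50 then
            acc else acc.set i.toNat (acc.getD i.toNat 0 + 1)) pf.2 row)) (p0, f0)
      (by intro acc x _; by_cases hx : PySem.List.pyGetD x i 0 ≥ 50 <;> simp [hx])]
    exact PySem.List.foldl_prod_mk
      (fun acc r => if PySem.List.pyGetD r i 0 ≥ 50 then
        acc.set i.toNat (acc.getD i.toNat 0 + 1) else acc)
      (fun acc r => if PySem.List.pyGetD r i 0 ≥ 50 then
        acc else acc.set i.toNat (acc.getD i.toNat 0 + 1)) ss p0 f0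
  have houter :
      (PySem.List.pyRange 0 (n : Int) 1).foldl
        (fun (pf : List Int × List Int) (i : Int) =>
          (PySem.List.pyRange 0 (ss.length : Int) 1).foldl
            (fun (pf : List Int × List Int) (j : Int) =>
              if PySem.List.pyGetD (PySem.List.pyGetD ss j []) i 0 ≥ 50 then
                (pf.1.set i.toNat (pf.1.getD i.toNat 0 + 1), pf.2)
              else
                (pf.1, pf.2.set i.toNat (pf.2.getD i.toNat 0 + 1)))
            pf)
        (List.replicate n 0, List.replicate n 0)
      = ((List.range n).map (fun (k : Nat) =>
            (ss.countP (fun row => decide (PySem.List.pyGetD row ((k : Nat) : Int) 0 ≥ 50)) : Int)),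
         (List.range n).map (fun (k : Nat) => (ss.length : Int) -
            (ss.countP (fun row => decide (PySem.List.pyGetD row ((k : Nat) : Int) 0 ≥ 50)) : Int))) := by
    rw [PySem.List.foldl_congr_mem _ _
      (fun (pf : List Int × List Int) (i : Int) =>
        ((fun (acc : List Int) (i : Int) => ss.foldl (fun acc row =>
            if PySem.List.pyGetD row i 0 ≥ 50 then
              acc.set i.toNat (acc.getD i.toNat 0 + 1) else acc) acc) pf.1 i,
         (fun (acc : List Int) (i : Int) => ss.foldl (fun acc row =>
            if PySem.List.pyGetD row i 0 ≥ 50 then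
              acc else acc.set i.toNat (acc.getD i.toNat 0 + 1)) acc) pf.2 i))
      (List.replicate n 0, List.replicate n 0)
      (fun acc x _ => hinner acc x)]
    refine Eq.trans (PySem.List.foldl_prod_mk
      (fun (acc : List Int) (i : Int) => ss.foldl (fun acc row =>
        if PySem.List.pyGetD row i 0 ≥ 50 then
          acc.set i.toNat (acc.getD i.toNat 0 + 1) else acc) acc)
      (fun (acc : List Int) (i : Int) => ss.foldl (fun acc row =>
        if PySem.List.pyGetD row i 0 ≥ 50 then
          acc else acc.set i.toNat (acc.getD i.toNat 0 + 1)) acc)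
      (PySem.List.pyRange 0 (n : Int) 1)
      (List.replicate n 0) (List.replicate n 0)) ?_
    congr 1
    · rw [pv_outer_fold _ _ (fun acc k hk => by
        simp only [Int.toNat_natCast]
        exact pv_setfold_pass (fun row => PySem.List.pyGetD row (k : Int) 0 ≥ 50) ss acc k hk)
        n n le_rfl, Nat.sub_self, List.replicate_zero, List.append_nil]
    · rw [pv_outer_fold _ _ (fun acc k hk => by
        simp only [Int.toNat_natCast]
        exact pv_setfold_fail (fun row => PySem.List.pyGetD row (k : Int) 0 ≥ 50) ss acc k hk)
        n n le_rfl, Nat.sub_self, List.replicate_zero, List.append_nil]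
  rw [houter]
  rw [pv_zipfold ss (List.replicate n 0) (by simpa using hrows')]
  simp [List.map_map, Function.comp]
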